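-- pv_equiv track=rewrite | github.com/climatecostindex/climate-cost-index | ingest/bls_ce.py | _extract_item_code
-- ===== SOURCE A (Python) =====
-- def _extract_item_code(category: str) -> str:
--     """Generate a normalized item code from the category name.
--
--     BLS CE tables don't always include explicit item codes in the
--     published Excel files. We preserve the category name and create
--     a normalized code by uppercasing, replacing spaces and special
--     characters, and truncating.
--
--     Args:
--         category: Raw category text from the CE table.
--
--     Returns:
--         Normalized item code string.
--     """
--     # Strip leading whitespace (hierarchy indentation) for the code,
--     # but preserve the full category text as-is.
--     stripped = category.strip()
--     # Create code: uppercase, replace non-alphanumeric with underscore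
--     code = ""
--     for ch in stripped.upper():
--         if ch.isalnum():
--             code += ch
--         elif code and code[-1] != "_":
--             code += "_"
--     # Remove trailing underscore
--     code = code.rstrip("_")
--     return code if code else "UNKNOWN"
-- ===== SOURCE B (Python) =====
-- def _extract_item_code(category: str) -> str:
--     """Generate a normalized item code from the category name.
--
--     Different decomposition: map every non-alphanumeric character of the
--     uppercased, stripped text to a space, split into words, join with '_'.
--     """
--     up = category.strip().upper()
--     masked = ''.join(ch if ch.isalnum() else ' ' for ch in up)
--     return '_'.join(masked.split()) or 'UNKNOWN'
-- ===== Notes on version B (the rewrite author's own statement) =====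
-- stated objective: simpler
-- what changed: Replaces A's character-by-character state machine (conditional separator appends plus a final trailing-separator strip) with a stateless pipeline: mask non-alphanumerics to spaces, split into words, join with underscores.
import Mathlib
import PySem

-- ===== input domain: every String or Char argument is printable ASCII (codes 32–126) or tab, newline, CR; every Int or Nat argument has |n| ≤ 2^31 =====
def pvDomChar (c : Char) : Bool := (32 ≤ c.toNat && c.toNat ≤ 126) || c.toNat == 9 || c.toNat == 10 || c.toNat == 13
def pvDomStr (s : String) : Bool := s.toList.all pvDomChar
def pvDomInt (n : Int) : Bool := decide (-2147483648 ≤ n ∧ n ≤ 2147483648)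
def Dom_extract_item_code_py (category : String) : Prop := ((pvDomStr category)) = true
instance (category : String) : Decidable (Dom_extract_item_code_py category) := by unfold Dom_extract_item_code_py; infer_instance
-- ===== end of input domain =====

-- B replaces A's stateful separator bookkeeping (append '_' unless the code is empty or already
-- ends in '_', then rstrip trailing '_') by masking non-alphanumerics to spaces, splitting into
-- words and joining with '_'; objective: simpler.

-- ===== PORT A =====
-- one loop iteration of A's for-loop: 'code[-1]' with the 'code and' guard is pyGet? code (-1)
-- (none exactly when code is empty, i.e. the Python guard is falsy)
def extract_item_code_step (code : List Char) (ch : Char) : List Char :=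
  if PySem.Chars.isalnum ch then code ++ [ch]
  else
    match PySem.List.pyGet? code (-1) with
    | some c0 => if c0 == '_' then code else code ++ ['_']
    | none => code

def extract_item_code_py (category : String) : String :=
  let stripped := PySem.Chars.strip category.toList
  let code := (PySem.Chars.upper stripped).foldl extract_item_code_step []
  -- code.rstrip("_"): drop the trailing '_' characters (ported by hand; exact for a 1-char set)
  let code := (code.reverse.dropWhile (fun c => c == '_')).reverse
  if code.isEmpty then "UNKNOWN" else String.ofList code

-- ===== PORT B =====
def extract_item_code_py_alt (category : String) : String :=
  let up := PySem.Chars.upper (PySem.Chars.strip category.toList)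
  let masked := up.map (fun ch => if PySem.Chars.isalnum ch then ch else ' ')
  let code := PySem.Chars.join ['_'] (PySem.Chars.split₀ masked)
  if code.isEmpty then "UNKNOWN" else String.ofList code

-- ===== PRECONDITION & SPEC =====
def Spec_extract_item_code_py (category : String) (out : String) : Prop := out = extract_item_code_py_alt category
instance (category : String) (out : String) : Decidable (Spec_extract_item_code_py category out) := by unfold Spec_extract_item_code_py; infer_instance

-- ===== CLAIM (what is proved, stated in full; the proofs are below) =====
def Claim_equal_extract_item_code_py : Prop := ∀ (category : String), Dom_extract_item_code_py category → Spec_extract_item_code_py category (extract_item_code_py category)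

-- ===== LEMMAS AND PROOFS =====

-- finishing steps of the two ports, and the loop-state correspondence
def pvFinishA (code : List Char) : String :=
  let code := (code.reverse.dropWhile (fun c => c == '_')).reverse
  if code.isEmpty then "UNKNOWN" else String.ofList code

def pvFinishB (words : List (List Char)) : String :=
  let code := PySem.Chars.join ['_'] words
  if code.isEmpty then "UNKNOWN" else String.ofList code

-- A's accumulated code as a function of B's split₀.go state (acc: finished words, reversed; cur: current run, reversed)
def pvCodeOf (acc : List (List Char)) (cur : List Char) : List Char :=
  if cur.isEmpty then
    if acc.isEmpty then [] else PySem.Chars.join ['_'] acc.reverse ++ ['_']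
  else PySem.Chars.join ['_'] (acc.reverse ++ [cur.reverse])

lemma pv_alnum_not_space (c : Char) (h : PySem.Chars.isalnum c = true) :
    PySem.Chars.isspace c = false := by
  simp [PySem.Chars.isalnum, PySem.Chars.isalpha, PySem.Chars.isdigit, PySem.Chars.isupper,
    PySem.Chars.islower, PySem.Chars.isspace, Char.le_def, UInt32.le_iff_toNat_le] at h ⊢
  omega

lemma pv_alnum_ne_underscore (c : Char) (h : PySem.Chars.isalnum c = true) :
    (c == '_') = false := by
  simp [PySem.Chars.isalnum, PySem.Chars.isalpha, PySem.Chars.isdigit, PySem.Chars.isupper,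
    PySem.Chars.islower, Char.le_def, UInt32.le_iff_toNat_le] at h
  simp [Char.ext_iff, ← UInt32.toNat_inj]
  omega

lemma pv_pyGet?_concat_neg_one (u : List Char) (c : Char) :
    PySem.List.pyGet? (u ++ [c]) (-1) = some c := by
  simp [PySem.List.pyGet?, PySem.List.pyIdx?]

lemma pv_join_snoc (sep : List Char) (l : List (List Char)) (w : List Char) :
    PySem.Chars.join sep (l ++ [w]) = if l = [] then w else PySem.Chars.join sep l ++ sep ++ w := by
  induction l with
  | nil => simp [PySem.Chars.join, List.intercalate]
  | cons a t ih => cases t <;> simp_all [PySem.Chars.join, List.intercalate, List.intersperse]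

-- a '_'-join of nonempty all-alphanumeric words ends in an alphanumeric character
lemma pv_join_ends_alnum (l : List (List Char)) (hne : l ≠ [])
    (hl : ∀ w ∈ l, w ≠ [] ∧ ∀ c ∈ w, PySem.Chars.isalnum c = true) :
    ∃ u c, PySem.Chars.join ['_'] l = u ++ [c] ∧ PySem.Chars.isalnum c = true := by
  induction l using List.reverseRecOn with
  | nil => exact absurd rfl hne
  | append_singleton l' w _ =>
    obtain ⟨hw, hwal⟩ := hl w (by simp)
    obtain ⟨c, u, rfl⟩ : ∃ c u, w = u ++ [c] := by
      refine ⟨w.getLast hw, w.dropLast, ?_⟩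
      exact (List.dropLast_append_getLast hw).symm
    rw [pv_join_snoc]
    split
    · exact ⟨u, c, rfl, hwal c (by simp)⟩
    · exact ⟨PySem.Chars.join ['_'] l' ++ ['_'] ++ u, c, by simp, hwal c (by simp)⟩

lemma pv_rstrip_concat_alnum (u : List Char) (c : Char)
    (h : PySem.Chars.isalnum c = true) :
    ((u ++ [c]).reverse.dropWhile (fun c => c == '_')).reverse = u ++ [c] := by
  simp [List.reverse_append, pv_alnum_ne_underscore c h]

lemma pv_rstrip_concat_alnum_underscore (u : List Char) (c : Char)
    (h : PySem.Chars.isalnum c = true) :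
    (((u ++ [c]) ++ ['_']).reverse.dropWhile (fun c => c == '_')).reverse = u ++ [c] := by
  simp [List.reverse_append, pv_alnum_ne_underscore c h]

lemma pv_go_nil (cur : List Char) (acc : List (List Char)) :
    PySem.Chars.split₀.go [] cur acc
      = if cur.isEmpty then acc.reverse else (cur.reverse :: acc).reverse := rfl

lemma pv_go_cons (c : Char) (rest cur : List Char) (acc : List (List Char)) :
    PySem.Chars.split₀.go (c :: rest) cur acc =
      if PySem.Chars.isspace c then
        (if cur.isEmpty then PySem.Chars.split₀.go rest [] acc
         else PySem.Chars.split₀.go rest [] (cur.reverse :: acc))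
      else PySem.Chars.split₀.go rest (c :: cur) acc := rfl

lemma pv_main (xs : List Char) : ∀ (cur : List Char) (acc : List (List Char)),
    (∀ c ∈ cur, PySem.Chars.isalnum c = true) →
    (∀ w ∈ acc, w ≠ [] ∧ ∀ c ∈ w, PySem.Chars.isalnum c = true) →
    pvFinishA (xs.foldl extract_item_code_step (pvCodeOf acc cur)) =
      pvFinishB (PySem.Chars.split₀.go
        (xs.map (fun ch => if PySem.Chars.isalnum ch then ch else ' ')) cur acc) := by
  induction xs with
  | nil =>
    intro cur acc hcur hacc
    match cur, acc with
    | [], [] =>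
      simp [pvFinishA, pvFinishB, pvCodeOf, pv_go_nil, PySem.Chars.join, List.intercalate]
    | [], w :: acc' =>
      obtain ⟨u, c, hj, hc⟩ := pv_join_ends_alnum (w :: acc').reverse (by simp)
        (by intro v hv; apply hacc; simp only [List.mem_reverse] at hv; exact hv)
      simp only [List.map_nil, pv_go_nil, List.isEmpty_nil, if_true, pvFinishA, pvFinishB,
        pvCodeOf, List.isEmpty_cons, Bool.false_eq_true, if_false, List.foldl_nil, hj]
      rw [pv_rstrip_concat_alnum_underscore u c hc]
    | d :: t, acc =>
      obtain ⟨u, c, hj, hc⟩ := pv_join_ends_alnum (acc.reverse ++ [(d :: t).reverse]) (by simp)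
        (by
          intro v hv
          rcases List.mem_append.1 hv with hv | hv
          · apply hacc; simp only [List.mem_reverse] at hv; exact hv
          · simp only [List.mem_singleton] at hv
            subst hv
            exact ⟨by simp, by intro x hx; apply hcur; simp only [List.mem_reverse] at hx; exact hx⟩)
      have hj' : PySem.Chars.join ['_'] (acc.reverse ++ [t.reverse ++ [d]]) = u ++ [c] := by
        simpa using hj
      simp only [List.map_nil, pv_go_nil, List.isEmpty_cons, Bool.false_eq_true, if_false,
        pvFinishA, pvFinishB, pvCodeOf, List.foldl_nil, List.reverse_cons, hj']
      rw [pv_rstrip_concat_alnum u c hc]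
  | cons c rest ih =>
    intro cur acc hcur hacc
    by_cases hc : PySem.Chars.isalnum c = true
    · have hstep : extract_item_code_step (pvCodeOf acc cur) c = pvCodeOf acc (c :: cur) := by
        match cur, acc with
        | [], [] => simp [extract_item_code_step, pvCodeOf, hc, PySem.Chars.join, List.intercalate]
        | [], w :: acc' =>
          simp only [extract_item_code_step, hc, if_true, pvCodeOf, List.isEmpty_nil,
            List.isEmpty_cons, Bool.false_eq_true, if_false, List.reverse_cons,
            List.reverse_nil, List.nil_append]
          conv_rhs => rw [pv_join_snoc]
          simp
        | d :: t, acc =>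
          simp only [extract_item_code_step, hc, if_true, pvCodeOf, List.isEmpty_cons,
            List.reverse_cons, Bool.false_eq_true, if_false]
          rw [pv_join_snoc, pv_join_snoc]
          split <;> simp
      simp only [List.map_cons, hc, if_true, List.foldl_cons, hstep, pv_go_cons,
        pv_alnum_not_space c hc, Bool.false_eq_true, if_false]
      exact ih (c :: cur) acc
        (by
          intro x hx
          simp only [List.mem_cons] at hx
          rcases hx with rfl | hx
          · exact hc
          · exact hcur x hx) hacc
    · have hcb : PySem.Chars.isalnum c = false := by simpa using hc
      have hsp : PySem.Chars.isspace ' ' = true := by decide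
      match cur, acc with
      | [], [] =>
        have hstep : extract_item_code_step (pvCodeOf [] []) c = pvCodeOf [] [] := by
          simp [extract_item_code_step, pvCodeOf, hcb, PySem.List.pyGet?, PySem.List.pyIdx?]
        simp only [List.map_cons, hcb, Bool.false_eq_true, if_false, List.foldl_cons, hstep,
          pv_go_cons, hsp, if_true, List.isEmpty_nil]
        exact ih [] [] (by simp) (by simp)
      | [], w :: acc' =>
        have hstep : extract_item_code_step (pvCodeOf (w :: acc') []) c = pvCodeOf (w :: acc') [] := by
          simp [extract_item_code_step, pvCodeOf, hcb]
        simp only [List.map_cons, hcb, Bool.false_eq_true, if_false, List.foldl_cons, hstep,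
          pv_go_cons, hsp, if_true, List.isEmpty_nil]
        exact ih [] (w :: acc') (by simp) hacc
      | d :: t, acc =>
        obtain ⟨u, c0, hj, hc0⟩ := pv_join_ends_alnum (acc.reverse ++ [(d :: t).reverse]) (by simp)
          (by
            intro v hv
            rcases List.mem_append.1 hv with hv | hv
            · apply hacc; simp only [List.mem_reverse] at hv; exact hv
            · simp only [List.mem_singleton] at hv
              subst hv
              exact ⟨by simp, by intro x hx; apply hcur; simp only [List.mem_reverse] at hx; exact hx⟩)
        have hj' : PySem.Chars.join ['_'] (acc.reverse ++ [t.reverse ++ [d]]) = u ++ [c0] := by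
          simpa using hj
        have hstep : extract_item_code_step (pvCodeOf acc (d :: t)) c
            = pvCodeOf ((d :: t).reverse :: acc) [] := by
          simp only [extract_item_code_step, hcb, Bool.false_eq_true, if_false, pvCodeOf,
            List.isEmpty_cons, List.isEmpty_nil, List.reverse_cons, if_true, hj',
            pv_pyGet?_concat_neg_one, pv_alnum_ne_underscore c0 hc0]

        simp only [List.map_cons, hcb, Bool.false_eq_true, if_false, List.foldl_cons, hstep,
          pv_go_cons, hsp, if_true, List.isEmpty_cons]
        exact ih [] ((d :: t).reverse :: acc) (by simp)
          (by
            intro v hv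
            simp only [List.mem_cons] at hv
            rcases hv with rfl | hv
            · exact ⟨by simp, by intro x hx; apply hcur; simp only [List.mem_reverse] at hx; exact hx⟩
            · exact hacc v hv)

-- ===== VERDICT (by name: the statement is the Claim_ definition above) =====
theorem extract_item_code_py_spec : Claim_equal_extract_item_code_py := by
  intro category _
  unfold Spec_extract_item_code_py
  have h := pv_main (PySem.Chars.upper (PySem.Chars.strip category.toList)) [] []
    (by simp) (by simp)
  simpa [extract_item_code_py, extract_item_code_py_alt, pvFinishA, pvFinishB, pvCodeOf,
    PySem.Chars.split₀] using h
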